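/-
  SSE ON THE FLAT USER MACHINE, PART 2: memory operands of SSE instructions.

      State.ea u a                 the effective address of the memory operand `a` in the user state `u` (what `Insn.effAddr`
                                   computes: base + index·scale + displacement, RIP-relative from the NEXT instruction's RIP)
      wpUser_effAddr               `effAddr a` is `u.ea a` (an equation: it reads user registers only)
      wpUser_readMemOp / wpUser_writeMemOp
                                   a load / a store of `n` bytes through a memory operand with plain attributes: flat memory,
                                   the one side condition is `L.Has (u.ea a) n`
                                   A load whose attributes DEMAND an alignment (`align = 16`: the 16-byte rule of a legacy SSE
                                   `xmm, m128` operand — XORPS, XORPD …) is the same rule: the model's `PlainAttr attr off` says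
                                   that the offset meets the alignment the attributes demand (`PlainAttr.of_aligned`).
      wpUser_probeWrite            "test for writability first" (`Insn.probeWrite`: a `MemVia.probe` request — what the masked-store
                                   epilogue `writeVecMaskedMem` of MOVSS / MOVSD / MOVUPS to memory does before it stores): the
                                   model's rule `Insn.wpUser_probeWrite`.
      wpUser_alignmentFirst        the required-alignment test before segmentation (`Insn.alignmentFirst`) passes
-/
import UserX.SseBase
namespace X86
namespace User

/-! ### Effective addresses -/

/-- **The effective address of a memory operand in a user state** (`Insn.effAddr`, X86/Sem/Lib.lean). Inside an instruction
body `u.rip` is already the address of the next instruction, which is what RIP-relative addressing is relative to. -/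
def State.ea (u : State) (a : MemOp) : Word :=
  let b : Word :=
    if a.ripRel then u.rip
    else match a.base with
      | none => 0
      | some r => u.reg r
  let i : Word :=
    match a.index with
    | none => 0
    | some (r, s) => u.reg r * UInt64.ofNat s
  truncAddr a.addrBits (b + i + a.disp)

/-- Truncation to the 64-bit address size is the identity. -/
theorem truncAddr64 (x : Word) : truncAddr 64 x = x := by
  simp only [truncAddr, Word.zext, Word.mask, ge_iff_le, Nat.le_refl, if_true]
  bv_decide

/-- With 64-bit addressing (every memory operand of 64-bit code without a 67H prefix) the effective address is the plain sum. -/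
theorem State.ea_addr64 (u : State) (a : MemOp) (h : a.addrBits = 64) :
    u.ea a =
      (if a.ripRel then u.rip else match a.base with | none => 0 | some r => u.reg r) +
      (match a.index with | none => 0 | some (r, s) => u.reg r * UInt64.ofNat s) + a.disp := by
  unfold State.ea
  rw [h, truncAddr64]

end User

namespace Sem
open User

section
variable {L : Layout} {μ : Microarch} {E : Fault → State → Prop} {u : State}

/-- **`effAddr` reads user registers only.** -/
theorem wpUser_effAddr {Q : Word → State → Prop} (a : MemOp) :
    wpUser L μ (Insn.effAddr a) Q E u = Q (u.ea a) u := by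
  unfold Insn.effAddr State.ea
  cases hr : a.ripRel <;> cases hb : a.base <;> cases hi : a.index <;>
    simp only [Sem.get, wpUser_bind', wpUser_read_rip, wpUser_read_gpr, wpUser_pure, wpUser_pure', Bool.false_eq_true,
      if_true, if_false]

/-- **A load through a memory operand** with plain attributes: `n` bytes of flat memory at the effective address. -/
theorem wpUser_readMemOp {Q : Nat → State → Prop} (a : MemOp) (n : Nat) (attr : AccessAttr)
    (hattr : PlainAttr attr (u.ea a)) (hn : 0 < n) (hhas : L.Has (u.ea a) n) (h : Q (u.mem.readLE (u.ea a) n) u) :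
    wpUser L μ (Insn.readMemOp a n attr) Q E u := by
  unfold Insn.readMemOp Insn.memReq Insn.in64
  simp only [wpUser_bind', wpUser_observe, wpUser_effAddr, wpUser_pure', Sem.load]
  intro m _
  exact wpUser_load (Layout.Readable.of hattr hn hhas) h

/-- **A store through a memory operand** with plain attributes: `n` bytes of flat memory at the effective address. -/
theorem wpUser_writeMemOp {Q : Unit → State → Prop} (a : MemOp) (n v : Nat) (attr : AccessAttr)
    (hattr : PlainAttr attr (u.ea a)) (hn : 0 < n) (hhas : L.Has (u.ea a) n) (h : Q () (u.setMem (u.mem.writeLE (u.ea a) n v))) :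
    wpUser L μ (Insn.writeMemOp a n v attr) Q E u := by
  unfold Insn.writeMemOp Insn.memReq Insn.in64
  simp only [wpUser_bind', wpUser_observe, wpUser_effAddr, wpUser_pure', Sem.store]
  intro m _
  exact wpUser_store (Layout.Writable.of hattr hn hhas) h

end
end Sem

/-! ### The probe and the alignment test of a store -/

namespace Sem
open User

section
variable {L : Layout} {μ : Microarch} {E : Fault → State → Prop} {u : State}

/-- **"Test for writability first"**: a probe inside the user region succeeds and leaves the user state as it is (the model's
`Insn.wpUser_probeWrite`, under the name the SSE rules use). -/
theorem wpUser_probeWrite {Q : Unit → State → Prop} (seg : Seg) (off : Word) (n : Nat) (attr : AccessAttr)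
    (hattr : PlainAttr attr off) (hn : 0 < n) (hhas : L.Has off n) (h : Q () u) :
    wpUser L μ (Insn.probeWrite seg off n attr) Q E u :=
  Insn.wpUser_probeWrite seg off n attr hattr hn hhas h

/-- **The required-alignment test before segmentation passes** for attributes that are plain at the offset: no alignment is
demanded, or the offset meets it (every segment base is 0 in the relation, so the linear address is the offset). -/
theorem wpUser_alignmentFirst {Q : Unit → State → Prop} (seg : Seg) (off : Word) (attr : AccessAttr)
    (hattr : PlainAttr attr off) (h : Q () u) : wpUser L μ (Insn.alignmentFirst seg off attr) Q E u := by
  unfold Insn.alignmentFirst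
  by_cases hgt : attr.align > 1
  · unfold Insn.effectiveLinear Insn.segBase Insn.in64
    simp only [hgt, if_true, wpUser_bind', wpUser_observe, wpUser_pure']
    intro m hm m' hm'
    have hbase : (m.seg seg).base = 0 := hm.core.seg_base seg
    have hlin : (if (m.in64 && !(seg == Seg.fs || seg == Seg.gs)) = true then 0 else (m.seg seg).base) + off = off := by
      rw [hbase]
      simp
    simp only [hm'.core.in64, if_true, hlin, hattr.align, Bool.not_true, Bool.false_eq_true, if_false, wpUser_pure']
    exact h
  · simp only [hgt, if_false, wpUser_pure']
    exact h

end
end Sem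
end X86
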